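-- pv_equiv track=rewrite | github.com/geswanel/Algorithms | YaAlgoTrainings/Training5.0/Complexity/F.py | findOddWindow
-- ===== SOURCE A (Python) =====
-- def findOddWindow(a: list[int]):
--     start = -1
--
--     for i, num in enumerate(a):
--         if num % 2 == 1 and start == -1:
--             start = i
--         elif num % 2 == 0 and start != -1:
--             return start, i - 1
--
--     return start, len(a) - 1
-- ===== SOURCE B (Python) =====
-- def findOddWindow(a: list[int]):
--     par = [x % 2 for x in a]
--     if 1 not in par:
--         return -1, len(a) - 1
--     start = par.index(1)
--     run = par[start:]
--     run_len = run.index(0) if 0 in run else len(run)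
--     return start, start + run_len - 1
-- ===== Notes on version B (the rewrite author's own statement) =====
-- stated objective: alternative
-- what changed: Replaces A's single stateful scan with early return by a declarative parity projection: build the parity list once, locate the window start with list.index, take the run slice, and compute the end with the uniform formula start + run_len - 1 instead of A's two distinct return sites.
import Mathlib
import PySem

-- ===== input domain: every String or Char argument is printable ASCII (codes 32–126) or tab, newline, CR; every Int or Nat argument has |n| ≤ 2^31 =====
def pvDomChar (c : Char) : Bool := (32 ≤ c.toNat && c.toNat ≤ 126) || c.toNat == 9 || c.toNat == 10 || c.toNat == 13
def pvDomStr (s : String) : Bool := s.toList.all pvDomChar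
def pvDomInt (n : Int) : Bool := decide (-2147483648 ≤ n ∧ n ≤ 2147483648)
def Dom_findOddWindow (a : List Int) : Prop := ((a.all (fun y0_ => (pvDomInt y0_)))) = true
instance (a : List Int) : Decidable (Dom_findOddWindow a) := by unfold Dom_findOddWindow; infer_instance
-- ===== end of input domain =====

-- B replaces A's stateful scan-with-early-return by a declarative parity projection:
-- it maps the list to parities once, locates the window with list.index, and computes
-- the end by the uniform formula start + run_len - 1 (objective: alternative decomposition).


-- ===== PORT A =====
-- A's single loop: `start` stays -1 until the first odd element; an even element with
-- start set returns early (start, i-1); falling off the loop returns (start, len(a)-1).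
def findOddWindowLoopA : List Int → Int → Int → Int → Int × Int
  | [], _, start, n => (start, n - 1)
  | x :: xs, i, start, n =>
    if PySem.Int.mod x 2 = 1 ∧ start = -1 then findOddWindowLoopA xs (i + 1) i n
    else if PySem.Int.mod x 2 = 0 ∧ start ≠ -1 then (start, i - 1)
    else findOddWindowLoopA xs (i + 1) start n

def findOddWindow (a : List Int) : Int × Int :=
  findOddWindowLoopA a 0 (-1) (a.length : Int)

-- ===== PORT B =====
-- Source B: par = [x % 2 for x in a]; guard `1 in par`; start = par.index(1);
-- run = par[start:]; run_len = run.index(0) if 0 in run else len(run);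
-- return start, start + run_len - 1.  (Each .index call is guarded by the matching
-- membership test as in Source B, so `.getD 0` renders it exactly: the default is unreachable.)
def findOddWindow_alt (a : List Int) : Int × Int :=
  let par := a.map (fun x => PySem.Int.mod x 2)
  if ¬ par.contains 1 then (-1, (a.length : Int) - 1)
  else
    let start := (PySem.List.index? par 1).getD 0
    let run := PySem.List.slice par (some (start : Int)) none
    let runLen : Int :=
      if run.contains 0 then ((PySem.List.index? run 0).getD 0 : Int)
      else (run.length : Int)
    ((start : Int), (start : Int) + runLen - 1)

-- ===== PRECONDITION & SPEC =====
def Spec_findOddWindow (a : List Int) (out : Int × Int) : Prop := out = findOddWindow_alt a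
instance (a : List Int) (out : Int × Int) : Decidable (Spec_findOddWindow a out) := by unfold Spec_findOddWindow; infer_instance

-- ===== CLAIM (what is proved, stated in full; the proofs are below) =====
def Claim_equal_findOddWindow : Prop := ∀ (a : List Int), Dom_findOddWindow a → Spec_findOddWindow a (findOddWindow a)

-- ===== LEMMAS AND PROOFS =====

-- Phase 2: once start is set (s ≠ -1), A's loop returns (s, j + k - 1) where k is the
-- index of the first even parity in the remaining list, or (s, n - 1) if there is none.
theorem loopA_after : ∀ (xs : List Int) (j s n : Int), s ≠ -1 →
    findOddWindowLoopA xs j s n =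
      (match PySem.List.index? (xs.map (fun x => PySem.Int.mod x 2)) 0 with
       | none => (s, n - 1)
       | some k => (s, j + (k : Int) - 1)) := by
  intro xs
  induction xs with
  | nil => intro j s n _; rfl
  | cons x xs ih =>
    intro j s n hs
    rw [findOddWindowLoopA, if_neg (fun h => hs h.2)]
    by_cases he : PySem.Int.mod x 2 = 0
    · rw [if_pos ⟨he, hs⟩]
      simp only [List.map_cons, he, PySem.List.index?_cons_self]
      simp
    · rw [if_neg (fun h => he h.1), ih _ _ _ hs]
      rw [List.map_cons, PySem.List.index?_cons_of_ne _ he]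
      cases hix : PySem.List.index? (xs.map (fun x => PySem.Int.mod x 2)) 0 with
      | none => simp
      | some k =>
        simp only [Option.map_some]
        refine Prod.ext rfl ?_
        push_cast
        ring

theorem loopA_after_none (xs : List Int) (j s n : Int) (hs : s ≠ -1)
    (h : PySem.List.index? (xs.map (fun x => PySem.Int.mod x 2)) 0 = none) :
    findOddWindowLoopA xs j s n = (s, n - 1) := by
  rw [loopA_after xs j s n hs, h]

theorem loopA_after_some (xs : List Int) (j s n : Int) (k : Nat) (hs : s ≠ -1)
    (h : PySem.List.index? (xs.map (fun x => PySem.Int.mod x 2)) 0 = some k) :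
    findOddWindowLoopA xs j s n = (s, j + (k : Int) - 1) := by
  rw [loopA_after xs j s n hs, h]

-- Phase 1: while start = -1, A's loop searches for the first odd parity at relative
-- index s and then continues on the tail with start = i + s.
theorem loopA_search : ∀ (xs : List Int) (i n : Int),
    findOddWindowLoopA xs i (-1) n =
      (match PySem.List.index? (xs.map (fun x => PySem.Int.mod x 2)) 1 with
       | none => (-1, n - 1)
       | some s => findOddWindowLoopA (xs.drop (s + 1)) (i + (s : Int) + 1) (i + (s : Int)) n) := by
  intro xs
  induction xs with
  | nil => intro i n; rfl
  | cons x xs ih =>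
    intro i n
    by_cases ho : PySem.Int.mod x 2 = 1
    · rw [findOddWindowLoopA, if_pos ⟨ho, rfl⟩]
      simp only [List.map_cons, ho, PySem.List.index?_cons_self]
      simp
    · have e1 : findOddWindowLoopA (x :: xs) i (-1) n = findOddWindowLoopA xs (i + 1) (-1) n := by
        rw [findOddWindowLoopA, if_neg (fun h => ho h.1), if_neg (fun h => h.2 rfl)]
      rw [e1, ih (i + 1) n, List.map_cons, PySem.List.index?_cons_of_ne _ ho]
      cases hix : PySem.List.index? (xs.map (fun x => PySem.Int.mod x 2)) 1 with
      | none => simp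
      | some s =>
        simp only [Option.map_some]
        have hdrop : (x :: xs).drop (s + 1 + 1) = xs.drop (s + 1) := rfl
        rw [hdrop]
        have h1 : i + 1 + (s : Int) + 1 = i + ((s : Int) + 1) + 1 := by ring
        have h2 : i + 1 + (s : Int) = i + ((s : Int) + 1) := by ring
        rw [h1, h2]
        push_cast
        rfl

theorem loopA_search_none (xs : List Int) (i n : Int)
    (h : PySem.List.index? (xs.map (fun x => PySem.Int.mod x 2)) 1 = none) :
    findOddWindowLoopA xs i (-1) n = (-1, n - 1) := by
  rw [loopA_search xs i n, h]

theorem loopA_search_some (xs : List Int) (i n : Int) (s : Nat)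
    (h : PySem.List.index? (xs.map (fun x => PySem.Int.mod x 2)) 1 = some s) :
    findOddWindowLoopA xs i (-1) n
      = findOddWindowLoopA (xs.drop (s + 1)) (i + (s : Int) + 1) (i + (s : Int)) n := by
  rw [loopA_search xs i n, h]

theorem findOddWindow_eq (a : List Int) : findOddWindow a = findOddWindow_alt a := by
  unfold findOddWindow findOddWindow_alt
  cases hfo : PySem.List.index? (a.map (fun x => PySem.Int.mod x 2)) 1 with
  | none =>
    have hmem : (1 : Int) ∉ a.map (fun x => PySem.Int.mod x 2) :=
      (PySem.List.index?_eq_none_iff _ 1).mp hfo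
    rw [loopA_search_none a 0 _ hfo]
    simp only [List.mem_map, not_exists, not_and] at hmem
    have hdvd : ∀ x ∈ a, (2 : Int) ∣ x := by
      intro x hx
      have h1 : PySem.Int.mod x 2 ≠ 1 := hmem x hx
      have hm : PySem.Int.mod x 2 = x % 2 := by
        simp [PySem.Int.mod, Int.fmod_eq_emod]
      rw [hm] at h1
      omega
    simp
    exact hdvd
  | some s =>
    set par := a.map (fun x => PySem.Int.mod x 2) with hpar
    have hmem : (1 : Int) ∈ par :=
      (PySem.List.index?_isSome_iff par 1).mp (by rw [hfo]; rfl)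
    obtain ⟨hlt, hgetEq, -⟩ := PySem.List.getElem_of_index?_eq_some hfo
    rw [loopA_search_some a 0 _ s hfo]
    rw [if_neg (by simp [hmem])]
    simp only [hfo, Option.getD_some]
    have hslice : PySem.List.slice par (some ((s : Nat) : Int)) none = par.drop s :=
      PySem.List.slice_from_natCast par s
    have hrun : par.drop s = 1 :: par.drop (s + 1) := by
      rw [List.drop_eq_getElem_cons hlt, hgetEq]
    have hmapdrop : (a.drop (s + 1)).map (fun x => PySem.Int.mod x 2) = par.drop (s + 1) := by
      rw [hpar, List.map_drop]
    have hlen : par.length = a.length := by rw [hpar]; simp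
    have hsne : (0 : Int) + (s : Int) ≠ -1 := by
      have : (0 : Int) ≤ (s : Int) := Int.natCast_nonneg s
      omega
    rw [hslice, hrun]
    by_cases hz : (0 : Int) ∈ par.drop (s + 1)
    · obtain ⟨k, hk⟩ := Option.isSome_iff_exists.mp ((PySem.List.index?_isSome_iff _ 0).mpr hz)
      rw [loopA_after_some (a.drop (s + 1)) _ _ _ k hsne (by rw [hmapdrop]; exact hk)]
      rw [PySem.List.index?_cons_of_ne _ (by decide : (1 : Int) ≠ 0), hk]
      rw [if_pos (by simp [List.mem_cons_of_mem _ hz])]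
      simp only [Option.map_some, Option.getD_some]
      refine Prod.ext (by simp) ?_
      push_cast
      ring
    · have h0 : PySem.List.index? ((a.drop (s + 1)).map (fun x => PySem.Int.mod x 2)) 0 = none := by
        rw [hmapdrop]; exact (PySem.List.index?_eq_none_iff _ 0).mpr hz
      rw [loopA_after_none (a.drop (s + 1)) _ _ _ hsne h0]
      have hnotmem : (0 : Int) ∉ (1 : Int) :: par.drop (s + 1) := by
        intro h
        rcases List.mem_cons.mp h with h | h
        · exact absurd h.symm (by decide)
        · exact hz h
      rw [if_neg (by simp [hnotmem])]
      refine Prod.ext (by simp) ?_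
      have hdl : (par.drop (s + 1)).length = par.length - (s + 1) := List.length_drop ..
      have hsl : s < a.length := by rw [← hlen]; exact hlt
      simp only [List.length_cons, hdl, hlen]
      push_cast [Nat.cast_sub (by omega : s + 1 ≤ a.length)]
      ring

-- ===== VERDICT (by name: the statement is the Claim_ definition above) =====
theorem findOddWindow_spec : Claim_equal_findOddWindow := by
  intro a _
  unfold Spec_findOddWindow
  exact findOddWindow_eq a
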